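-- pv_equiv track=rewrite | github.com/thekoushikdurgas/docsai | scripts/scanner.py | _extract_tasks_block_lines
-- ===== SOURCE A (Python) =====
-- TASK_SECTION_HEADERS = {"## Tasks", "## Task tracks"}
--
-- def _extract_tasks_block_lines(content: str) -> list[str] | None:
--     """Return lines inside the first ## Tasks or ## Task tracks section until next ## heading."""
--     lines = content.splitlines()
--     start = None
--     for i, line in enumerate(lines):
--         stripped = line.strip()
--         if stripped in TASK_SECTION_HEADERS:
--             start = i + 1
--             break
--     if start is None:
--         return None
--     block: list[str] = []
--     for j in range(start, len(lines)):
--         line = lines[j]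
--         if line.startswith("## ") and not line.startswith("###"):
--             break
--         block.append(line)
--     return block
-- ===== SOURCE B (Python) =====
-- TASK_SECTION_HEADERS = {"## Tasks", "## Task tracks"}
--
-- def _extract_tasks_block_lines(content: str) -> list[str] | None:
--     """Single pass over the lines with a found/collecting state machine."""
--     found = False
--     block: list[str] = []
--     for line in content.splitlines():
--         if not found:
--             found = line.strip() in TASK_SECTION_HEADERS
--             continue
--         if line.startswith("## ") and not line.startswith("###"):
--             break
--         block.append(line)
--     return block if found else None
-- ===== Notes on version B (the rewrite author's own statement) =====
-- stated objective: simpler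
-- what changed: Replaces A's two sequential loops (index-hunting pass for the header, then an index-range collecting pass) with one flag-driven pass over the lines that never touches indices.
import Mathlib
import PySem

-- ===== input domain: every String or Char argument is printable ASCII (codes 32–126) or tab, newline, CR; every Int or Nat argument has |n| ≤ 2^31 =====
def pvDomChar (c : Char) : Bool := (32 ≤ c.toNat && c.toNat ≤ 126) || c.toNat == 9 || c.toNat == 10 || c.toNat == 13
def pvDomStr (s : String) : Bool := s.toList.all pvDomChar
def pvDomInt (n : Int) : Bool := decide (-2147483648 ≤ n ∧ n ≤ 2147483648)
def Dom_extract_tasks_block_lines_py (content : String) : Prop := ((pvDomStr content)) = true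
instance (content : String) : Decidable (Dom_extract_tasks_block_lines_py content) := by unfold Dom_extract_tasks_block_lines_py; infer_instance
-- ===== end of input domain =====

-- B fuses A's two sequential loops into one flag-driven pass over the lines (objective: simpler).
-- ===== PORT A =====
def pvHeaders : List String := ["## Tasks", "## Task tracks"]

-- A, first loop: find the first header line; 'some rest' = the lines after it (start = i+1)
def pvAFind : List String → Option (List String)
  | [] => none
  | l :: rest =>
    if pvHeaders.contains (PySem.Str.strip l) then some rest else pvAFind rest

-- A, second loop: collect until the next '## ' heading (break = return [])
def pvACollect : List String → List String
  | [] => []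
  | l :: rest =>
    if PySem.Str.startswith l "## " && !(PySem.Str.startswith l "###") then []
    else l :: pvACollect rest

def extract_tasks_block_lines_py (content : String) : Option (List String) :=
  match pvAFind (PySem.Str.splitlines content) with
  | none => none
  | some rest => some (pvACollect rest)

-- ===== PORT B =====
-- B: one pass, state (found, block); break = return the state
def pvBScan : List String → Bool → List String → Bool × List String
  | [], found, block => (found, block)
  | l :: rest, found, block =>
    if !found then
      pvBScan rest (pvHeaders.contains (PySem.Str.strip l)) block
    else if PySem.Str.startswith l "## " && !(PySem.Str.startswith l "###") then (found, block)
    else pvBScan rest found (block ++ [l])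

def extract_tasks_block_lines_py_alt (content : String) : Option (List String) :=
  let r := pvBScan (PySem.Str.splitlines content) false []
  if r.1 then some r.2 else none

-- ===== PRECONDITION & SPEC =====
def Spec_extract_tasks_block_lines_py (content : String) (out : Option (List String)) : Prop := out = extract_tasks_block_lines_py_alt content
instance (content : String) (out : Option (List String)) : Decidable (Spec_extract_tasks_block_lines_py content out) := by unfold Spec_extract_tasks_block_lines_py; infer_instance

-- ===== CLAIM (what is proved, stated in full; the proofs are below) =====
def Claim_equal_extract_tasks_block_lines_py : Prop := ∀ (content : String), Dom_extract_tasks_block_lines_py content → Spec_extract_tasks_block_lines_py content (extract_tasks_block_lines_py content)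

-- ===== LEMMAS AND PROOFS =====

lemma pvBScan_found (ls : List String) : ∀ block : List String,
    pvBScan ls true block = (true, block ++ pvACollect ls) := by
  induction ls with
  | nil => intro block; simp [pvBScan, pvACollect]
  | cons l rest ih =>
    intro block
    simp only [pvBScan, pvACollect]
    split_ifs with h h2 <;> simp_all [ih]

lemma pvMain (ls : List String) :
    (match pvAFind ls with
      | none => (none : Option (List String))
      | some rest => some (pvACollect rest)) =
    (if (pvBScan ls false []).1 then some (pvBScan ls false []).2 else none) := by
  induction ls with
  | nil => simp [pvAFind, pvBScan]
  | cons l rest ih =>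
    simp only [pvAFind, pvBScan]
    by_cases h : PySem.Str.strip l ∈ pvHeaders
    · simp [h, pvBScan_found]
    · simpa [h] using ih

-- ===== VERDICT (by name: the statement is the Claim_ definition above) =====
theorem extract_tasks_block_lines_py_spec : Claim_equal_extract_tasks_block_lines_py := by
  intro content _
  unfold Spec_extract_tasks_block_lines_py extract_tasks_block_lines_py
    extract_tasks_block_lines_py_alt
  exact pvMain (PySem.Str.splitlines content)
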